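-- pv_equiv track=rewrite | github.com/Mateusz2734/agh | asd/ex_09/zad1.py | stacje_1
-- ===== SOURCE A (Python) =====
-- def stacje_1(L, S):
--     N = len(S)
--
--     lista_stacji = [0]
--     poz = L
--
--     while poz < N:
--         i = poz
--         while i >= poz - L and S[i] is None:
--             i -= 1
--
--         lista_stacji.append(i)
--         poz += L - (poz - i)
--
--     return lista_stacji
-- ===== SOURCE B (Python) =====
-- def stacje_1(L, S):
--     # Precompute for every position the nearest station index at or before it,
--     # then each greedy jump is a single array lookup instead of a backward scan.
--     nearest = []
--     last = None
--     for i, x in enumerate(S):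
--         if x is not None:
--             last = i
--         nearest.append(last)
--     res = [0]
--     c = 0
--     while c + L < len(S):
--         c = nearest[c + L]
--         res.append(c)
--     return res
-- ===== Notes on version B (the rewrite author's own statement) =====
-- stated objective: alternative
-- what changed: B precomputes in one pass a nearest-previous-station array and makes each greedy jump a single array lookup, replacing A's inner backward scan of up to L cells per step.
-- outside the precondition, e.g. on stacje_1(0, []): A returns [0], B returns [0]
import Mathlib
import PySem

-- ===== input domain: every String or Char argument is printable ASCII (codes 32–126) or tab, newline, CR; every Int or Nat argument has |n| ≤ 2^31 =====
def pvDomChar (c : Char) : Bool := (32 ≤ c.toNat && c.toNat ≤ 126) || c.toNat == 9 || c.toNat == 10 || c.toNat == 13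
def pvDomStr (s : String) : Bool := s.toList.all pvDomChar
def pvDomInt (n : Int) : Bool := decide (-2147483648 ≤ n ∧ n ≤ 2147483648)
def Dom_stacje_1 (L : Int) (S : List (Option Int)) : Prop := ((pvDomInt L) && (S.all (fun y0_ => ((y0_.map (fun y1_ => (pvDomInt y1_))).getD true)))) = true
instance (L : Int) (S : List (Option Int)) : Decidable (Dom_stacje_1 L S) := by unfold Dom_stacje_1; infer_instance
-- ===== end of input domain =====

-- B replaces A's inner backward scan per greedy step by a precomputed
-- nearest-previous-station array with a single lookup per step (alternative algorithm).

-- ===== PORT A =====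
-- inner 'while i >= poz - L and S[i] is None: i -= 1' (fuel only makes it total;
-- under Pre_ the fuel given is never exhausted)
def pvInnerA (S : List (Option Int)) (low : Int) : Int → Nat → Int
  | i, 0 => i
  | i, fuel+1 =>
    if low ≤ i ∧ PySem.List.pyGet? S i = some none then pvInnerA S low (i-1) fuel else i

-- outer 'while poz < N' loop of A
def pvOuterA (L : Int) (S : List (Option Int)) : List Int → Int → Nat → List Int
  | acc, _, 0 => acc
  | acc, poz, fuel+1 =>
    if poz < (S.length : Int) then
      let i := pvInnerA S (poz - L) poz (S.length + L.toNat + 1)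
      pvOuterA L S (acc ++ [i]) (poz + (L - (poz - i))) fuel
    else acc

def stacje_1 (L : Int) (S : List (Option Int)) : List Int :=
  pvOuterA L S [0] L (S.length + 1)

-- ===== PORT B =====
-- one pass building nearest[i] = index of last non-None at or before i
def pvNearest (S : List (Option Int)) : List (Option Int) :=
  (S.foldl (fun (st : List (Option Int) × Option Int × Int) x =>
      let last := if x.isSome then some st.2.2 else st.2.1
      (st.1 ++ [last], last, st.2.2 + 1))
    ([], none, 0)).1

-- 'while c + L < len(S)' loop of B (fuel only makes it total)
def pvLoopB (L N : Int) (nr : List (Option Int)) : List Int → Int → Nat → List Int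
  | res, _, 0 => res
  | res, c, fuel+1 =>
    if c + L < N then
      match PySem.List.pyGet? nr (c + L) with
      | some (some j) => pvLoopB L N nr (res ++ [j]) j fuel
      | _ => res
    else res

def stacje_1_alt (L : Int) (S : List (Option Int)) : List Int :=
  pvLoopB L S.length (pvNearest S) [0] 0 (S.length + 1)

-- ===== PRECONDITION & SPEC =====
-- Pre_ excludes non-positive L and inputs having a station-free window of L cells
-- whose right end is below len(S): there A loops forever, walks backwards or uses
-- Python's negative-index wraparound (the only excluded input on which A still
-- returns is the degenerate (0, []), where both programs return [0]).
def Pre_stacje_1 (L : Int) (S : List (Option Int)) : Prop :=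
  1 ≤ L ∧ ∀ p < S.length, ((p : Int) + L < (S.length : Int)) →
    ∃ j < S.length, (p : Int) < (j : Int) ∧ (j : Int) ≤ (p : Int) + L ∧ S[j]? ≠ some none
instance (L : Int) (S : List (Option Int)) : Decidable (Pre_stacje_1 L S) := by
  unfold Pre_stacje_1; infer_instance

def pvWitness_stacje_1 : Int × List (Option Int) := (2, [some 5, none, some 3])

def Spec_stacje_1 (L : Int) (S : List (Option Int)) (out : List Int) : Prop := out = stacje_1_alt L S
instance (L : Int) (S : List (Option Int)) (out : List Int) : Decidable (Spec_stacje_1 L S out) := by unfold Spec_stacje_1; infer_instance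

-- ===== CLAIM (what is proved, stated in full; the proofs are below) =====
def Claim_equal_stacje_1 : Prop := ∀ (L : Int) (S : List (Option Int)), Dom_stacje_1 L S → Pre_stacje_1 L S → Spec_stacje_1 L S (stacje_1 L S)

-- ===== LEMMAS AND PROOFS =====

-- spec helper: index of the nearest non-None entry at or before k
def prevSt (S : List (Option Int)) : Nat → Option Int
  | 0 => match S[0]? with | some (some _) => some (0:Int) | _ => none
  | k+1 => match S[(k+1)]? with | some (some _) => some ((k:Int)+1) | _ => prevSt S k

def lastSt (S : List (Option Int)) : Option Int :=
  match S.length with | 0 => none | n+1 => prevSt S n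

theorem prevSt_cases (S : List (Option Int)) (k : Nat) :
    prevSt S k = none ∨
    ∃ jn : Nat, prevSt S k = some (jn : Int) ∧ jn ≤ k ∧ S[jn]? ≠ some none ∧
      ∀ m, jn < m → m ≤ k → m < S.length → S[m]? = some none := by
  induction k with
  | zero =>
    unfold prevSt
    rcases h : S[0]? with _ | (_ | v)
    · exact Or.inl rfl
    · exact Or.inl rfl
    · exact Or.inr ⟨0, rfl, le_refl _, by simp [h], by omega⟩
  | succ k ih =>
    unfold prevSt
    rcases h : S[k+1]? with _ | (_ | v)
    · rcases ih with h' | ⟨jn, h1, h2, h3, h4⟩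
      · exact Or.inl h'
      · refine Or.inr ⟨jn, h1, by omega, h3, ?_⟩
        intro m hm1 hm2 hm3
        rcases Nat.lt_or_ge m (k+1) with hlt | hge
        · exact h4 m hm1 (by omega) hm3
        · have := List.getElem?_eq_none_iff.mp h
          omega
    · rcases ih with h' | ⟨jn, h1, h2, h3, h4⟩
      · exact Or.inl h'
      · refine Or.inr ⟨jn, h1, by omega, h3, ?_⟩
        intro m hm1 hm2 hm3
        rcases Nat.lt_or_ge m (k+1) with hlt | hge
        · exact h4 m hm1 (by omega) hm3
        · have : m = k+1 := by omega
          simpa [this] using h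
    · exact Or.inr ⟨k+1, by push_cast; rfl, le_refl _, by simp [h], by omega⟩

theorem prevSt_none (S : List (Option Int)) (k : Nat) (h : prevSt S k = none) :
    ∀ t ≤ k, t < S.length → S[t]? = some none := by
  induction k with
  | zero =>
    intro t ht htl
    have ht0 : t = 0 := by omega
    subst ht0
    rcases h0 : S[0]? with _ | (_ | v)
    · have := List.getElem?_eq_none_iff.mp h0; omega
    · rfl
    · unfold prevSt at h
      rw [h0] at h
      cases h
  | succ k ih =>
    intro t ht htl
    unfold prevSt at h
    rcases h0 : S[(k+1)]? with _ | (_ | v) <;> rw [h0] at h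
    · rcases Nat.lt_or_ge t (k+1) with hlt | hge
      · exact ih h t (by omega) htl
      · have hte : t = k+1 := by omega
        subst hte
        have := List.getElem?_eq_none_iff.mp h0
        omega
    · rcases Nat.lt_or_ge t (k+1) with hlt | hge
      · exact ih h t (by omega) htl
      · have hte : t = k+1 := by omega
        subst hte
        exact h0
    · cases h

-- prevSt only looks at the prefix
theorem prevSt_append (S T : List (Option Int)) (k : Nat) (hk : k < S.length) :
    prevSt (S ++ T) k = prevSt S k := by
  induction k with
  | zero =>
    unfold prevSt
    rw [List.getElem?_append_left (by omega)]
  | succ k ih =>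
    unfold prevSt
    rw [List.getElem?_append_left (by omega)]
    rcases h : S[k+1]? with _ | (_ | v) <;> simp [ih (by omega)]

theorem prevSt_concat (S : List (Option Int)) (x : Option Int) :
    prevSt (S ++ [x]) S.length =
      if x.isSome then some (S.length : Int) else lastSt S := by
  have hx : (S ++ [x])[S.length]? = some x := by
    rw [List.getElem?_append_right (le_refl _)]
    simp
  rcases hS : S.length with _ | n
  · have hSnil : S = [] := List.length_eq_zero_iff.mp hS
    subst hSnil
    unfold prevSt lastSt
    rcases x with _ | v <;> simp
  · unfold prevSt
    rw [hS] at hx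
    rw [hx]
    rcases x with _ | v
    · simp only [Option.isSome_none, Bool.false_eq_true, if_false, lastSt, hS]
      exact prevSt_append S [none] n (by omega)
    · simp

-- full characterisation of B's fold state
theorem pvNearest_fold (S : List (Option Int)) :
    (S.foldl (fun (st : List (Option Int) × Option Int × Int) x =>
        let last := if x.isSome then some st.2.2 else st.2.1
        (st.1 ++ [last], last, st.2.2 + 1))
      ([], none, 0)) =
    ((List.range S.length).map (prevSt S), lastSt S, (S.length : Int)) := by
  induction S using List.reverseRecOn with
  | nil => simp [lastSt]
  | append_singleton S x ih =>
    rw [List.foldl_append, ih]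
    have hlast : lastSt (S ++ [x]) = prevSt (S ++ [x]) S.length := by
      unfold lastSt
      simp
    have hmap : (List.range (S ++ [x]).length).map (prevSt (S ++ [x])) =
        (List.range S.length).map (prevSt S) ++ [prevSt (S ++ [x]) S.length] := by
      simp [List.range_succ]
      intro k hk
      exact prevSt_append S [x] k hk
    simp only [hmap, hlast, prevSt_concat]
    rcases x with _ | v <;> simp

theorem pvNearest_spec (S : List (Option Int)) :
    pvNearest S = (List.range S.length).map (prevSt S) := by
  unfold pvNearest
  rw [pvNearest_fold]

theorem pvNearest_get (S : List (Option Int)) (k : Nat) (hk : k < S.length) :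
    PySem.List.pyGet? (pvNearest S) (k : Int) = some (prevSt S k) := by
  rw [PySem.List.pyGet?_natCast, pvNearest_spec, List.getElem?_map, List.getElem?_range hk]
  rfl

-- A's inner scan stops exactly at the nearest station
theorem pvInnerA_eq (S : List (Option Int)) :
    ∀ fuel (k jn : Nat) (low : Int), jn ≤ k → k < S.length → S[jn]? ≠ some none →
    (∀ m, jn < m → m ≤ k → m < S.length → S[m]? = some none) → low ≤ (jn : Int) → k - jn ≤ fuel →
    pvInnerA S low (k : Int) fuel = (jn : Int) := by
  intro fuel
  induction fuel with
  | zero =>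
    intro k jn low h1 _ _ _ _ h5
    have : k = jn := by omega
    simp [pvInnerA, this]
  | succ fuel ih =>
    intro k jn low h1 hklen h2 h3 h4 h5
    unfold pvInnerA
    by_cases hkj : k = jn
    · subst hkj
      rw [if_neg]
      intro ⟨_, hc⟩
      rw [PySem.List.pyGet?_natCast] at hc
      exact h2 hc
    · have hlt : jn < k := by omega
      rw [if_pos ⟨by exact_mod_cast le_trans h4 (by exact_mod_cast Nat.le_of_lt hlt),
            by rw [PySem.List.pyGet?_natCast]; exact h3 k hlt (le_refl _) hklen⟩]
      have hc : (k : Int) - 1 = ((k - 1 : Nat) : Int) := by omega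
      rw [hc]
      exact ih (k-1) jn low (by omega) (by omega) h2
        (fun m hm1 hm2 hm3 => h3 m hm1 (by omega) hm3) h4 (by omega)

-- lockstep simulation of the two loops
theorem loops_eq (L : Int) (S : List (Option Int)) (hP : Pre_stacje_1 L S) :
    ∀ fuel (c : Nat) (acc : List Int),
      pvOuterA L S acc ((c : Int) + L) fuel =
      pvLoopB L S.length (pvNearest S) acc (c : Int) fuel := by
  obtain ⟨hL, hw⟩ := hP
  intro fuel
  induction fuel with
  | zero => intro c acc; rfl
  | succ fuel ih =>
    intro c acc
    unfold pvOuterA pvLoopB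
    by_cases h : (c : Int) + L < (S.length : Int)
    · rw [if_pos h, if_pos h]
      have hc_len : c < S.length := by omega
      obtain ⟨j, hjlen, hcj, hjle, hjne⟩ := hw c hc_len h
      set k : Nat := c + L.toNat with hkdef
      have hk : (k : Int) = (c : Int) + L := by
        have : (L.toNat : Int) = L := Int.toNat_of_nonneg (by omega)
        push_cast [hkdef]; omega
      have hklen : k < S.length := by omega
      have hjk : j ≤ k := by omega
      -- nearest station before k
      rcases prevSt_cases S k with hnone | ⟨jn, hp1, hp2, hp3, hp4⟩
      · exact absurd (prevSt_none S k hnone j hjk hjlen) hjne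
      have hcjn : c < jn := by
        by_contra hle
        exact hjne (hp4 j (by omega) hjk hjlen)
      -- A's inner scan returns jn
      have hinner : pvInnerA S ((c : Int) + L - L) ((c : Int) + L) (S.length + L.toNat + 1)
          = (jn : Int) := by
        have hlow : (c : Int) + L - L = (c : Int) := by ring
        rw [hlow, ← hk]
        exact pvInnerA_eq S _ k jn (c : Int) hp2 hklen hp3 hp4
          (by exact_mod_cast Nat.le_of_lt hcjn) (by omega)
      -- B's lookup returns jn
      have hlook : PySem.List.pyGet? (pvNearest S) ((c : Int) + L) = some (some (jn : Int)) := by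
        rw [← hk, pvNearest_get S k hklen, hp1]
      simp only [hinner, hlook]
      have hpoz : (c : Int) + L + (L - ((c : Int) + L - (jn : Int))) = (jn : Int) + L := by ring
      rw [hpoz]
      exact ih jn (acc ++ [(jn : Int)])
    · rw [if_neg h, if_neg h]

-- ===== VERDICT (by name: the statement is the Claim_ definition above) =====
theorem stacje_1_spec : Claim_equal_stacje_1 := by
  intro L S _ hP
  unfold Spec_stacje_1 stacje_1 stacje_1_alt
  have := loops_eq L S hP (S.length + 1) 0 [0]
  simpa using this
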